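-- pv_equiv track=rewrite | github.com/cli3ntside/lainplayer | lain.py | replace_surrounded_spaces
-- ===== SOURCE A (Python) =====
-- protected_positions = {
--     9: list(range(6, 24)),
--     10: list(range(4, 25)),
--     11: list(range(4, 26)),
--     12: list(range(3, 26)),
--     13: list(range(3, 24)),
--     14: list(range(3, 24)),
--     15: list(range(3, 24)),
--     16: list(range(3, 27)),
--     17: list(range(3, 26)),
--     18: list(range(3, 28)),
--     19: list(range(3, 27)),
-- }
--
-- def replace_surrounded_spaces(ascii_art):
--     result = []
--     for line_number, line in enumerate(ascii_art):
--         new_line = []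
--         i = 0
--
--         while i < len(line):
--             if line[i] == ' ':
--                 start = i
--                 while i < len(line) and line[i] == ' ':
--                     i += 1
--                 end = i
--                 if start > 0 and end < len(line) and line[start-1] != ' ' and line[end] != ' ':
--                     if line_number not in protected_positions or not any(pos in range(start, end) for pos in protected_positions[line_number]):
--                         new_line.append('#' * (end - start))
--                     else:
--                         new_line.append(line[start:end])
--                 else:
--                     new_line.append(line[start:end])
--             else:
--                 new_line.append(line[i])
--                 i += 1
--
--         new_line = ''.join(new_line)
--         result.append(new_line)
--     return result
-- ===== SOURCE B (Python) =====
-- # B: group each line into maximal equal-character runs, then replace interior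
-- # space runs (those with runs on both sides) by '#' runs unless they overlap the
-- # line's protected column span (interval arithmetic instead of a per-position scan).
--
-- protected_spans = {
--     9: (6, 24),
--     10: (4, 25),
--     11: (4, 26),
--     12: (3, 26),
--     13: (3, 24),
--     14: (3, 24),
--     15: (3, 24),
--     16: (3, 27),
--     17: (3, 26),
--     18: (3, 28),
--     19: (3, 27),
-- }
--
-- def _runs(line):
--     runs = []
--     i = 0
--     while i < len(line):
--         j = i
--         while j < len(line) and line[j] == line[i]:
--             j += 1
--         runs.append((line[i], j - i))
--         i = j
--     return runs
--
-- def replace_surrounded_spaces(ascii_art):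
--     result = []
--     for line_number, line in enumerate(ascii_art):
--         runs = _runs(line)
--         span = protected_spans.get(line_number)
--         pieces = []
--         pos = 0
--         for k, (ch, cnt) in enumerate(runs):
--             if ch == ' ' and 0 < k < len(runs) - 1 and not (
--                 span is not None and max(pos, span[0]) < min(pos + cnt, span[1])
--             ):
--                 pieces.append('#' * cnt)
--             else:
--                 pieces.append(ch * cnt)
--             pos += cnt
--         result.append(''.join(pieces))
--     return result
-- ===== Notes on version B (the rewrite author's own statement) =====
-- stated objective: alternative
-- what changed: B decomposes each line into maximal equal-character runs in one grouping pass and then maps runs (a space run is hashed iff it is an interior run and does not overlap the line's protected (lo,hi) span, checked by interval arithmetic), instead of A's index-scanning loop with neighbour-character tests and a per-position linear scan over the protected position lists.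
import Mathlib
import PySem

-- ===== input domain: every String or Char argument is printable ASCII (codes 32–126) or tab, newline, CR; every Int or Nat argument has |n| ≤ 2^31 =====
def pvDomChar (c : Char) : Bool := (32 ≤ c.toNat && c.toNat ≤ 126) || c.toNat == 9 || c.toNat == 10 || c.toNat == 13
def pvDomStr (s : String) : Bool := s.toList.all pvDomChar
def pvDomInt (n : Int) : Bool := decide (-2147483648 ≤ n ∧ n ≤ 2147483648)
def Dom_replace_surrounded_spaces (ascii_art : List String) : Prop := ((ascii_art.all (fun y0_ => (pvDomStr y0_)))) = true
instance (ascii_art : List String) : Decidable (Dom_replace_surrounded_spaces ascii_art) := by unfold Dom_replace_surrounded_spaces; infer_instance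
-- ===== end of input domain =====

-- B groups each line into maximal equal-character runs and replaces interior space runs
-- using interval arithmetic against a (lo,hi) span table, instead of A's index scanning
-- with neighbour-character tests and a per-position membership scan (objective: alternative).

-- ===== PORT A =====
def protected_positions : PySem.Dict Int (List Int) :=
  PySem.Dict.ofList
    [ (9, PySem.List.pyRange 6 24 1), (10, PySem.List.pyRange 4 25 1),
      (11, PySem.List.pyRange 4 26 1), (12, PySem.List.pyRange 3 26 1),
      (13, PySem.List.pyRange 3 24 1), (14, PySem.List.pyRange 3 24 1),
      (15, PySem.List.pyRange 3 24 1), (16, PySem.List.pyRange 3 27 1),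
      (17, PySem.List.pyRange 3 26 1), (18, PySem.List.pyRange 3 28 1),
      (19, PySem.List.pyRange 3 27 1) ]

-- A's inner `while i < len(line) and line[i] == ' ': i += 1`
def spanEndA (l : List Char) (i : Nat) : Nat :=
  if i < l.length ∧ l.getD i 'x' = ' ' then spanEndA l (i + 1) else i
termination_by l.length - i
decreasing_by omega

theorem spanEndA_ge (l : List Char) (i : Nat) : i ≤ spanEndA l i := by
  rw [spanEndA]
  split
  · have := spanEndA_ge l (i + 1); omega
  · omega
termination_by l.length - i
decreasing_by omega

theorem spanEndA_gt (l : List Char) (i : Nat) (h1 : i < l.length)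
    (h2 : l.getD i 'x' = ' ') : i < spanEndA l i := by
  rw [spanEndA, if_pos ⟨h1, h2⟩]
  have := spanEndA_ge l (i + 1); omega

-- A's outer while loop over one line (state: index i, list of appended pieces)
def lineA (ln : Int) (l : List Char) (i : Nat) (acc : List (List Char)) : List (List Char) :=
  if hi : i < l.length then
    if hsp : l.getD i 'x' = ' ' then
      lineA ln l (spanEndA l i)
        (acc ++ [if 0 < i ∧ spanEndA l i < l.length ∧ l.getD (i - 1) 'x' ≠ ' ' ∧ l.getD (spanEndA l i) 'x' ≠ ' ' then
            if protected_positions.contains ln = false ∨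
               ¬ ((protected_positions.getD ln []).any
                    (fun p => decide ((i : Int) ≤ p ∧ p < (spanEndA l i : Int))) = true) then
              List.replicate (spanEndA l i - i) '#'
            else PySem.List.slice l (some (i : Int)) (some (spanEndA l i : Int))
          else PySem.List.slice l (some (i : Int)) (some (spanEndA l i : Int))])
    else lineA ln l (i + 1) (acc ++ [[l.getD i 'x']])
  else acc
termination_by l.length - i
decreasing_by
  · have := spanEndA_gt l i hi hsp; omega
  · omega

def replace_surrounded_spaces (ascii_art : List String) : List String :=
  (PySem.List.enumerate ascii_art 0).foldl
    (fun result p => result ++ [String.ofList (PySem.Chars.join [] (lineA p.1 p.2.toList 0 []))]) []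

-- ===== PORT B =====
def protected_spans : PySem.Dict Int (Int × Int) :=
  PySem.Dict.ofList
    [ (9, (6, 24)), (10, (4, 25)), (11, (4, 26)), (12, (3, 26)), (13, (3, 24)),
      (14, (3, 24)), (15, (3, 24)), (16, (3, 27)), (17, (3, 26)), (18, (3, 28)), (19, (3, 27)) ]

-- B's inner `while j < len(line) and line[j] == line[i]: j += 1`
def runEndB (l : List Char) (c : Char) (j : Nat) : Nat :=
  if j < l.length ∧ l.getD j 'x' = c then runEndB l c (j + 1) else j
termination_by l.length - j
decreasing_by omega

theorem runEndB_ge (l : List Char) (c : Char) (j : Nat) : j ≤ runEndB l c j := by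
  rw [runEndB]
  split
  · have := runEndB_ge l c (j + 1); omega
  · omega
termination_by l.length - j
decreasing_by omega

theorem runEndB_gt (l : List Char) (c : Char) (j : Nat) (h1 : j < l.length)
    (h2 : l.getD j 'x' = c) : j < runEndB l c j := by
  rw [runEndB, if_pos ⟨h1, h2⟩]
  have := runEndB_ge l c (j + 1); omega

-- B's `_runs`: maximal runs (char, count) of the line
def runsB (l : List Char) (i : Nat) : List (Char × Nat) :=
  if hi : i < l.length then
    (l.getD i 'x', runEndB l (l.getD i 'x') i - i) :: runsB l (runEndB l (l.getD i 'x') i)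
  else []
termination_by l.length - i
decreasing_by
  have := runEndB_gt l (l.getD i 'x') i hi rfl
  omega

-- B's per-line pass: fold over the enumerated runs with (pieces, pos) state
def lineB (ln : Int) (l : List Char) : List Char :=
  let rs := runsB l 0
  let span := protected_spans.get? ln
  PySem.Chars.join []
    ((PySem.List.enumerate rs 0).foldl
      (fun (st : List (List Char) × Nat) kp =>
        (st.1 ++ [if kp.2.1 = ' ' ∧ 0 < kp.1 ∧ kp.1 < (rs.length : Int) - 1 ∧
              ¬ ((span.any fun sp =>
                  decide (max (st.2 : Int) sp.1 < min ((st.2 : Int) + (kp.2.2 : Int)) sp.2)) = true) then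
            List.replicate kp.2.2 '#'
          else List.replicate kp.2.2 kp.2.1], st.2 + kp.2.2)) ([], 0)).1

def replace_surrounded_spaces_alt (ascii_art : List String) : List String :=
  (PySem.List.enumerate ascii_art 0).foldl
    (fun result p => result ++ [String.ofList (lineB p.1 p.2.toList)]) []

-- ===== PRECONDITION & SPEC =====
def Spec_replace_surrounded_spaces (ascii_art : List String) (out : List String) : Prop := out = replace_surrounded_spaces_alt ascii_art
instance (ascii_art : List String) (out : List String) : Decidable (Spec_replace_surrounded_spaces ascii_art out) := by unfold Spec_replace_surrounded_spaces; infer_instance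

-- ===== CLAIM (what is proved, stated in full; the proofs are below) =====
def Claim_equal_replace_surrounded_spaces : Prop := ∀ (ascii_art : List String), Dom_replace_surrounded_spaces ascii_art → Spec_replace_surrounded_spaces ascii_art (replace_surrounded_spaces ascii_art)


-- ===== LEMMAS AND PROOFS =====

-- ''.join of a piece list is flattening
theorem joinNil (xs : List (List Char)) : PySem.Chars.join [] xs = xs.flatten := by
  induction xs with
  | nil => rfl
  | cons a t ih =>
    cases t with
    | nil => simp [PySem.Chars.join, List.intercalate]
    | cons b t2 =>
      rw [PySem.Chars.join_cons_cons] at *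
      simp_all

-- A's `any(pos in range(s, e) for pos in range(lo, hi))` is interval overlap
theorem any_range_overlap (lo hi s e : Int) (h : lo < hi) :
    (((PySem.List.pyRange lo hi 1).any (fun p => decide (s ≤ p ∧ p < e))) = true) ↔
      max s lo < min e hi := by
  rw [List.any_eq_true]
  constructor
  · rintro ⟨p, hp, hc⟩
    rw [PySem.List.mem_pyRange_one] at hp
    simp at hc; omega
  · intro hlt
    exact ⟨max s lo, by rw [PySem.List.mem_pyRange_one]; omega, by simp; omega⟩

theorem protCase (ln : Int) (lo hi : Int) (hlh : lo < hi)
    (h1 : protected_positions.contains ln = true)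
    (h2 : protected_positions.getD ln [] = PySem.List.pyRange lo hi 1)
    (h3 : protected_spans.get? ln = some (lo, hi)) (s e : Nat) :
    (protected_positions.contains ln = false ∨
      ¬ ((protected_positions.getD ln []).any (fun p => decide ((s : Int) ≤ p ∧ p < (e : Int))) = true))
    ↔ ¬ (((protected_spans.get? ln).any fun sp =>
          decide (max (s : Int) sp.1 < min (e : Int) sp.2)) = true) := by
  rw [h1, h2, h3]
  simp only [Option.any_some, Bool.true_eq_false, false_or, decide_eq_true_eq]
  rw [any_range_overlap _ _ _ _ hlh]

theorem protDefault (ln : Int) (h1 : protected_positions.contains ln = false)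
    (h3 : protected_spans.get? ln = none) (s e : Nat) :
    (protected_positions.contains ln = false ∨
      ¬ ((protected_positions.getD ln []).any (fun p => decide ((s : Int) ≤ p ∧ p < (e : Int))) = true))
    ↔ ¬ (((protected_spans.get? ln).any fun sp =>
          decide (max (s : Int) sp.1 < min (e : Int) sp.2)) = true) := by
  rw [h3]
  simp [h1]

-- A's protected test equals B's span-overlap test, for every line number
theorem protEq (ln : Int) (s e : Nat) :
    (protected_positions.contains ln = false ∨
      ¬ ((protected_positions.getD ln []).any (fun p => decide ((s : Int) ≤ p ∧ p < (e : Int))) = true))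
    ↔ ¬ (((protected_spans.get? ln).any fun sp =>
          decide (max (s : Int) sp.1 < min (e : Int) sp.2)) = true) := by
  by_cases h9 : ln = 9
  · subst h9; exact protCase _ 6 24 (by decide) (by decide) (by decide) (by decide) s e
  by_cases h10 : ln = 10
  · subst h10; exact protCase _ 4 25 (by decide) (by decide) (by decide) (by decide) s e
  by_cases h11 : ln = 11
  · subst h11; exact protCase _ 4 26 (by decide) (by decide) (by decide) (by decide) s e
  by_cases h12 : ln = 12
  · subst h12; exact protCase _ 3 26 (by decide) (by decide) (by decide) (by decide) s e
  by_cases h13 : ln = 13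
  · subst h13; exact protCase _ 3 24 (by decide) (by decide) (by decide) (by decide) s e
  by_cases h14 : ln = 14
  · subst h14; exact protCase _ 3 24 (by decide) (by decide) (by decide) (by decide) s e
  by_cases h15 : ln = 15
  · subst h15; exact protCase _ 3 24 (by decide) (by decide) (by decide) (by decide) s e
  by_cases h16 : ln = 16
  · subst h16; exact protCase _ 3 27 (by decide) (by decide) (by decide) (by decide) s e
  by_cases h17 : ln = 17
  · subst h17; exact protCase _ 3 26 (by decide) (by decide) (by decide) (by decide) s e
  by_cases h18 : ln = 18
  · subst h18; exact protCase _ 3 28 (by decide) (by decide) (by decide) (by decide) s e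
  by_cases h19 : ln = 19
  · subst h19; exact protCase _ 3 27 (by decide) (by decide) (by decide) (by decide) s e
  · apply protDefault
    · simp [protected_positions, PySem.Dict.ofList, PySem.Dict.contains, PySem.Dict.update,
        PySem.Dict.insert, PySem.Dict.empty, PySem.Dict.get?]
      omega
    · simp [protected_spans, PySem.Dict.ofList, PySem.Dict.update, PySem.Dict.insert,
        PySem.Dict.empty, PySem.Dict.get?]
      omega

-- properties of B's inner while (run end)
theorem runEndB_le (l : List Char) (c : Char) (j : Nat) (hj : j ≤ l.length) :
    runEndB l c j ≤ l.length := by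
  rw [runEndB]
  split
  · exact runEndB_le l c (j + 1) (by omega)
  · exact hj
termination_by l.length - j
decreasing_by omega

theorem runEndB_run (l : List Char) (c : Char) (j : Nat) :
    ∀ x, j ≤ x → x < runEndB l c j → l.getD x 'x' = c := by
  intro x hjx hxe
  rw [runEndB] at hxe
  split at hxe
  · rename_i hg
    rcases Nat.eq_or_lt_of_le hjx with h | h
    · exact h ▸ hg.2
    · exact runEndB_run l c (j + 1) x h hxe
  · omega
termination_by l.length - j
decreasing_by omega

theorem runEndB_stop (l : List Char) (c : Char) (j : Nat) :
    runEndB l c j < l.length → l.getD (runEndB l c j) 'x' ≠ c := by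
  rw [runEndB]
  split
  · exact runEndB_stop l c (j + 1)
  · rename_i hg
    intro h hcc
    exact hg ⟨h, hcc⟩
termination_by l.length - j
decreasing_by omega

-- A's inner while is B's inner while specialised to the space character
theorem spanEndA_eq_runEndB (l : List Char) (i : Nat) : spanEndA l i = runEndB l ' ' i := by
  rw [spanEndA, runEndB]
  split
  · rw [spanEndA_eq_runEndB l (i + 1)]
  · rfl
termination_by l.length - i
decreasing_by omega

theorem runsB_eq_nil_iff (l : List Char) (i : Nat) : runsB l i = [] ↔ l.length ≤ i := by
  rw [runsB]
  split
  · simp; omega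
  · simp; omega

-- a slice of a constant stretch is a replicate
theorem slice_run (l : List Char) (c : Char) (j e : Nat) (hel : e ≤ l.length)
    (hrun : ∀ x, j ≤ x → x < e → l.getD x 'x' = c) :
    PySem.List.slice l (some (j : Int)) (some (e : Int)) = List.replicate (e - j) c := by
  rw [PySem.List.slice_natCast]
  apply List.ext_getElem
  · simp; omega
  · intro m h1 h2
    simp only [List.getElem_take, List.getElem_drop, List.getElem_replicate]
    have hm : m < e - j := by simpa using h2
    have := hrun (j + m) (by omega) (by omega)
    rwa [List.getD_eq_getElem l 'x' (by omega)] at this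

-- the common per-line shape both programs compute (defined A-wise)
def emitA (ln : Int) (l : List Char) (i : Nat) : List Char :=
  if hi : i < l.length then
    if hsp : l.getD i 'x' = ' ' then
      (if 0 < i ∧ spanEndA l i < l.length ∧ l.getD (i - 1) 'x' ≠ ' ' ∧ l.getD (spanEndA l i) 'x' ≠ ' ' then
        if protected_positions.contains ln = false ∨
           ¬ ((protected_positions.getD ln []).any
                (fun p => decide ((i : Int) ≤ p ∧ p < (spanEndA l i : Int))) = true) then
          List.replicate (spanEndA l i - i) '#'
        else PySem.List.slice l (some (i : Int)) (some (spanEndA l i : Int))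
       else PySem.List.slice l (some (i : Int)) (some (spanEndA l i : Int))) ++ emitA ln l (spanEndA l i)
    else l.getD i 'x' :: emitA ln l (i + 1)
  else []
termination_by l.length - i
decreasing_by
  · have := spanEndA_gt l i hi hsp; omega
  · omega

-- A's accumulating loop flattens to emitA
theorem lineA_flatten (ln : Int) (l : List Char) (i : Nat) (acc : List (List Char)) :
    (lineA ln l i acc).flatten = acc.flatten ++ emitA ln l i := by
  by_cases hi : i < l.length
  · by_cases hsp : l.getD i 'x' = ' '
    · rw [lineA, emitA, dif_pos hi, dif_pos hi, dif_pos hsp, dif_pos hsp, lineA_flatten]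
      simp
    · rw [lineA, emitA, dif_pos hi, dif_pos hi, dif_neg hsp, dif_neg hsp, lineA_flatten]
      simp
  · rw [lineA, emitA, dif_neg hi, dif_neg hi]
    simp
termination_by l.length - i
decreasing_by
  · have := spanEndA_gt l i hi hsp; omega
  · omega

-- emitA passes straight through a constant non-space stretch
theorem emitA_nonspace_run (ln : Int) (l : List Char) (c : Char) (hc : c ≠ ' ') :
    ∀ (n i : Nat), i + n ≤ l.length → (∀ x, i ≤ x → x < i + n → l.getD x 'x' = c) →
      emitA ln l i = List.replicate n c ++ emitA ln l (i + n) := by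
  intro n
  induction n with
  | zero => intro i _ _; simp
  | succ m ih =>
    intro i hlen hrun
    have hi : i < l.length := by omega
    have hgi : l.getD i 'x' = c := hrun i (by omega) (by omega)
    have harith : i + 1 + m = i + (m + 1) := by omega
    rw [emitA, dif_pos hi, dif_neg (by rw [hgi]; exact hc),
        ih (i + 1) (by omega) (fun x hx1 hx2 => hrun x (by omega) (by omega)),
        List.replicate_succ, harith, hgi]
    simp

-- B's recursive run-emission (proof-side mirror of B's fold)
def emitB (span : Option (Int × Int)) (K : Nat) : Int → Nat → List (Char × Nat) → List Char
  | _, _, [] => []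
  | k, pos, (ch, cnt) :: rest =>
      (if ch = ' ' ∧ 0 < k ∧ k < (K : Int) - 1 ∧
          ¬ ((span.any fun sp =>
              decide (max (pos : Int) sp.1 < min ((pos : Int) + (cnt : Int)) sp.2)) = true) then
        List.replicate cnt '#'
      else List.replicate cnt ch) ++ emitB span K (k + 1) (pos + cnt) rest

-- B's fold over the enumerated runs flattens to emitB
theorem foldB (span : Option (Int × Int)) (K : Nat) (rs : List (Char × Nat)) :
    ∀ (k : Int) (acc : List (List Char)) (pos : Nat),
    (((PySem.List.enumerate rs k).foldl
       (fun (st : List (List Char) × Nat) kp =>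
         (st.1 ++ [if kp.2.1 = ' ' ∧ 0 < kp.1 ∧ kp.1 < (K : Int) - 1 ∧
              ¬ ((span.any fun sp =>
                  decide (max (st.2 : Int) sp.1 < min ((st.2 : Int) + (kp.2.2 : Int)) sp.2)) = true) then
            List.replicate kp.2.2 '#'
          else List.replicate kp.2.2 kp.2.1], st.2 + kp.2.2)) (acc, pos)).1).flatten
    = acc.flatten ++ emitB span K k pos rs := by
  induction rs with
  | nil => intro k acc pos; simp [PySem.List.enumerate_nil, emitB]
  | cons hd tl ih =>
    intro k acc pos
    obtain ⟨ch, cnt⟩ := hd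
    rw [PySem.List.enumerate_cons, List.foldl_cons, ih, emitB]
    simp

-- main induction: B's emission over the runs of a suffix equals emitA on that suffix
theorem emitB_eq_emitA (ln : Int) (l : List Char) :
    ∀ (i k : Nat), i ≤ l.length → (0 < k ↔ 0 < i) →
      (0 < i → i < l.length → l.getD (i - 1) 'x' ≠ l.getD i 'x') →
      emitB (protected_spans.get? ln) (k + (runsB l i).length) (k : Int) i (runsB l i)
        = emitA ln l i := by
  intro i k hil hk hprev
  by_cases hi : i < l.length
  · rw [runsB, dif_pos hi]
    set c := l.getD i 'x' with hc
    set e := runEndB l c i with he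
    have hie : i < e := runEndB_gt l c i hi hc.symm
    have hel : e ≤ l.length := runEndB_le l c i (by omega)
    have hrun : ∀ x, i ≤ x → x < e → l.getD x 'x' = c := runEndB_run l c i
    have hstop : e < l.length → l.getD e 'x' ≠ c := runEndB_stop l c i
    have hrest : (runsB l e = []) ↔ l.length ≤ e := runsB_eq_nil_iff l e
    have hRlen : 0 < (runsB l e).length ↔ e < l.length := by
      constructor
      · intro h
        by_contra hcon
        have := hrest.mpr (by omega)
        simp [this] at h
      · intro h
        have hne : runsB l e ≠ [] := fun hnil => by have := hrest.mp hnil; omega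
        exact List.length_pos_iff.mpr hne
    have hpos : i + (e - i) = e := by omega
    have hK : k + ((c, e - i) :: runsB l e).length = (k + 1) + (runsB l e).length := by
      simp; omega
    have hdec : l.length - e < l.length - i := by omega
    have ihp : 0 < e → e < l.length → l.getD (e - 1) 'x' ≠ l.getD e 'x' := by
      intro _ hel2 heq
      have h1 : l.getD (e - 1) 'x' = c := hrun (e - 1) (by omega) (by omega)
      exact hstop hel2 (heq ▸ h1)
    rw [emitB, hK, hpos,
        show ((k : Int) + 1) = (((k + 1 : Nat)) : Int) by push_cast; ring,
        emitB_eq_emitA ln l e (k + 1) hel (by omega) ihp]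
    by_cases hsp : c = ' '
    · have hspan : spanEndA l i = e := by
        rw [spanEndA_eq_runEndB, he, hsp]
      conv_rhs => rw [emitA, dif_pos hi, dif_pos hsp]
      rw [hspan]
      congr 1
      have hkpos : (0 < (k : Int)) ↔ 0 < i := by omega
      have hlast : ((k : Int) < (((k + 1) + (runsB l e).length : Nat) : Int) - 1) ↔ e < l.length := by
        omega
      have hcast : ((i : Int) + ((e - i : Nat) : Int)) = (e : Int) := by omega
      rw [hcast]
      by_cases hb : 0 < i ∧ e < l.length
      · have hb1 : l.getD (i - 1) 'x' ≠ ' ' := by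
          have := hprev hb.1 hi
          rw [hsp] at this
          exact this
        have hb2 : l.getD e 'x' ≠ ' ' := by
          have := hstop hb.2
          rw [hsp] at this
          exact this
        conv_rhs => rw [if_pos ⟨hb.1, hb.2, hb1, hb2⟩]
        by_cases hov : (((protected_spans.get? ln).any fun sp =>
            decide (max (i : Int) sp.1 < min (e : Int) sp.2)) = true)
        · have hnotB : ¬ (c = ' ' ∧ 0 < (k : Int) ∧
              (k : Int) < ((k + 1 + (runsB l e).length : Nat) : Int) - 1 ∧
              ¬ (((protected_spans.get? ln).any fun sp =>
                  decide (max (i : Int) sp.1 < min (e : Int) sp.2)) = true)) :=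
            fun hcon => hcon.2.2.2 hov
          have hnotA : ¬ (protected_positions.contains ln = false ∨
              ¬ ((protected_positions.getD ln []).any
                   (fun p => decide ((i : Int) ≤ p ∧ p < (e : Int))) = true)) :=
            fun hcon => (protEq ln i e).mp hcon hov
          rw [if_neg hnotB, if_neg hnotA, slice_run l c i e hel hrun, hsp]
        · have hyB : (c = ' ' ∧ 0 < (k : Int) ∧
              (k : Int) < ((k + 1 + (runsB l e).length : Nat) : Int) - 1 ∧
              ¬ (((protected_spans.get? ln).any fun sp =>
                  decide (max (i : Int) sp.1 < min (e : Int) sp.2)) = true)) :=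
            ⟨hsp, hkpos.mpr hb.1, hlast.mpr hb.2, hov⟩
          have hyA : (protected_positions.contains ln = false ∨
              ¬ ((protected_positions.getD ln []).any
                   (fun p => decide ((i : Int) ≤ p ∧ p < (e : Int))) = true)) :=
            (protEq ln i e).mpr hov
          rw [if_pos hyB, if_pos hyA]
      · have hnA : ¬ (0 < i ∧ e < l.length ∧
            l.getD (i - 1) 'x' ≠ ' ' ∧ l.getD e 'x' ≠ ' ') :=
          fun hcon => hb ⟨hcon.1, hcon.2.1⟩
        have hnB : ¬ (c = ' ' ∧ 0 < (k : Int) ∧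
            (k : Int) < ((k + 1 + (runsB l e).length : Nat) : Int) - 1 ∧
            ¬ (((protected_spans.get? ln).any fun sp =>
                decide (max (i : Int) sp.1 < min (e : Int) sp.2)) = true)) :=
          fun hcon => hb ⟨hkpos.mp hcon.2.1, hlast.mp hcon.2.2.1⟩
        rw [if_neg hnB, if_neg hnA, slice_run l c i e hel hrun, hsp]
    · have hcond : ¬ (c = ' ' ∧ 0 < (k : Int) ∧
          (k : Int) < (((k + 1) + (runsB l e).length : Nat) : Int) - 1 ∧
          ¬ (((protected_spans.get? ln).any fun sp =>
              decide (max (i : Int) sp.1 < min ((i : Int) + ((e - i : Nat) : Int)) sp.2)) = true)) :=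
        fun hcon => hsp hcon.1
      rw [if_neg hcond,
          emitA_nonspace_run ln l c hsp (e - i) i (by omega) (fun x h1 h2 => hrun x h1 (by omega)),
          hpos]
  · rw [runsB, dif_neg hi, emitA, dif_neg hi]
    rfl
termination_by i _ => l.length - i
decreasing_by exact hdec

-- one line: A's pieces joined equal B's per-line result
theorem perLine (ln : Int) (l : List Char) :
    PySem.Chars.join [] (lineA ln l 0 []) = lineB ln l := by
  rw [joinNil, lineA_flatten]
  simp only [List.flatten_nil, List.nil_append]
  unfold lineB
  rw [joinNil, foldB]
  simp only [List.flatten_nil, List.nil_append]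
  have := emitB_eq_emitA ln l 0 0 (by omega) (by omega) (by omega)
  simpa using this.symm

-- ===== VERDICT (by name: the statement is the Claim_ definition above) =====
theorem replace_surrounded_spaces_spec : Claim_equal_replace_surrounded_spaces := by
  intro ascii_art _
  unfold Spec_replace_surrounded_spaces replace_surrounded_spaces replace_surrounded_spaces_alt
  rw [PySem.List.foldl_append_singleton_eq_map, PySem.List.foldl_append_singleton_eq_map]
  simp only [List.nil_append]
  apply List.map_congr_left
  intro p _
  rw [perLine]
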